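-- pv_equiv track=rewrite | github.com/lmasz/PTStudy | Cryptology/crypto_utils.py | base26ish_2_word
-- ===== SOURCE A (Python) =====
-- alphabet = "ABCDEFGHIJKLMNOPQRSTUVWXYZ"
--
-- def num_to_let(number):
--   return alphabet[number%26]
--
-- def base26ish_2_word(value):
--     total = 0
--     word = ['','','']
--     for i in range(2,-1,-1):
--         letter = value // (26**i)
--         word[2-i] = (num_to_let(letter))
--         value = value - (letter*(26**i))
--
--     return word
-- ===== SOURCE B (Python) =====
-- alphabet = "ABCDEFGHIJKLMNOPQRSTUVWXYZ"
--
-- # Precomputed lexicographic table of all 26**3 three-letter words; the answer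
-- # is a table lookup at value % 17576 (no per-call digit arithmetic at all).
-- WORDS = [[a, b, c] for a in alphabet for b in alphabet for c in alphabet]
--
-- def base26ish_2_word(value):
--     return list(WORDS[value % 17576])
-- ===== Notes on version B (the rewrite author's own statement) =====
-- stated objective: alternative
-- what changed: Replaces A's countdown loop with running subtraction and per-digit division by a precomputed lexicographic table of all 26^3 three-letter words, indexed once at value % 17576; per-call digit arithmetic disappears entirely.
import Mathlib
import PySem

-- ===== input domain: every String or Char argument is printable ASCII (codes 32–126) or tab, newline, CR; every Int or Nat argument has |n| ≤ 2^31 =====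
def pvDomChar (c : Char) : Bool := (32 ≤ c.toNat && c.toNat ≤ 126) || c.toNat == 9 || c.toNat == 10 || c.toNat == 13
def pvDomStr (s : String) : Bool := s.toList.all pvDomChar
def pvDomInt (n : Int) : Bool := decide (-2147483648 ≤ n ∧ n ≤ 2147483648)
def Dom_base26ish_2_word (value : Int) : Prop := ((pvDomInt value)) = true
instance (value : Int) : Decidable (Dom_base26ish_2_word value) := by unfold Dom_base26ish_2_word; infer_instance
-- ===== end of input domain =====

-- B replaces A's countdown loop with a precomputed lexicographic table of all 26^3 three-letter
-- words, looked up at value % 17576 (objective: alternative — table lookup instead of digit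
-- extraction; same result).

-- ===== PORT A =====
def pvAlphabet : String := "ABCDEFGHIJKLMNOPQRSTUVWXYZ"

-- alphabet[number % 26]; the index is always in range, so the IndexError branch ("") is unreachable
def num_to_let (number : Int) : String :=
  match PySem.Str.pyGet? pvAlphabet (PySem.Int.mod number 26) with
  | some c => String.ofList [c]
  | none => ""

def base26ish_2_word (value : Int) : List String :=
  let word : List String := ["", "", ""]
  let st := (PySem.List.pyRange 2 (-1) (-1)).foldl
    (fun (st : Int × List String) (i : Int) =>
      let letter := PySem.Int.floordiv st.1 ((26 : Int) ^ i.toNat)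
      let word' := st.2.set (2 - i).toNat (num_to_let letter)
      (st.1 - letter * (26 : Int) ^ i.toNat, word'))
    (value, word)
  st.2

-- ===== PORT B =====
-- WORDS = [[a, b, c] for a in alphabet for b in alphabet for c in alphabet]
def pvWords : List (List String) :=
  pvAlphabet.toList.flatMap fun a =>
    pvAlphabet.toList.flatMap fun b =>
      pvAlphabet.toList.map fun c =>
        [String.ofList [a], String.ofList [b], String.ofList [c]]

-- WORDS[value % 17576]; the index is always in [0, 17576), so the none branch is unreachable
def base26ish_2_word_alt (value : Int) : List String :=
  match PySem.List.pyGet? pvWords (PySem.Int.mod value 17576) with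
  | some w => w
  | none => []

-- ===== PRECONDITION & SPEC =====
def Spec_base26ish_2_word (value : Int) (out : List String) : Prop := out = base26ish_2_word_alt value
instance (value : Int) (out : List String) : Decidable (Spec_base26ish_2_word value out) := by unfold Spec_base26ish_2_word; infer_instance

-- ===== CLAIM =====
def Claim_equal_base26ish_2_word : Prop := ∀ (value : Int), Dom_base26ish_2_word value → Spec_base26ish_2_word value (base26ish_2_word value)

-- ===== LEMMAS AND PROOFS =====
theorem alphabet_len : pvAlphabet.toList.length = 26 := by decide

theorem flatMap_length_const {α β : Type} (f : α → List β) (k : ℕ)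
    (hk : ∀ a, (f a).length = k) (xs : List α) :
    (xs.flatMap f).length = xs.length * k := by
  induction xs with
  | nil => simp
  | cons x xs ih => simp [hk, ih]; ring

theorem flatMap_getElem? {α β : Type} (f : α → List β) (k : ℕ)
    (hk : ∀ a, (f a).length = k) (xs : List α) (i : ℕ) :
    (xs.flatMap f)[i]? = (xs[i / k]?).bind (fun a => (f a)[i % k]?) := by
  induction xs generalizing i with
  | nil => simp
  | cons x xs ih =>
    rw [List.flatMap_cons]
    by_cases h : i < k
    · rw [List.getElem?_append_left (by rw [hk]; exact h)]
      rw [Nat.div_eq_of_lt h, Nat.mod_eq_of_lt h]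
      simp
    · push Not at h
      rcases Nat.eq_zero_or_pos k with hk0 | hkpos
      · have hfe : ∀ a, f a = [] := fun a =>
          List.eq_nil_of_length_eq_zero (hk0 ▸ hk a)
        cases hx : (x :: xs)[i / k]? <;> simp [hfe]
      · rw [List.getElem?_append_right (by rw [hk]; exact h), hk x, ih,
            Nat.div_eq_sub_div hkpos h, Nat.mod_eq_sub_mod h]
        simp

theorem words_getElem? (i : ℕ) (hi : i < 17576) :
    pvWords[i]? = some [String.ofList [pvAlphabet.toList.getD (i / 676) 'A'],
                        String.ofList [pvAlphabet.toList.getD ((i % 676) / 26) 'A'],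
                        String.ofList [pvAlphabet.toList.getD (i % 26) 'A']] := by
  have hG : ∀ a b : Char,
      ((pvAlphabet.toList.map fun c =>
        [String.ofList [a], String.ofList [b], String.ofList [c]]).length) = 26 := by
    intro a b; rw [List.length_map]; exact alphabet_len
  have hF : ∀ a : Char,
      ((pvAlphabet.toList.flatMap fun b => pvAlphabet.toList.map fun c =>
        [String.ofList [a], String.ofList [b], String.ofList [c]]).length) = 676 := by
    intro a
    rw [flatMap_length_const _ 26 (hG a), alphabet_len]
  unfold pvWords
  rw [flatMap_getElem? _ 676 hF]
  rw [List.getElem?_eq_getElem (by rw [alphabet_len]; omega)]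
  simp only [Option.bind_some]
  rw [flatMap_getElem? _ 26 (hG _)]
  rw [List.getElem?_eq_getElem (by rw [alphabet_len]; omega)]
  simp only [Option.bind_some]
  rw [List.getElem?_map,
      List.getElem?_eq_getElem (show i % 676 % 26 < pvAlphabet.toList.length by rw [alphabet_len]; omega)]
  simp only [Option.map_some]
  have h1 : i % 676 % 26 = i % 26 := by omega
  rw [List.getD_eq_getElem _ _ (by rw [alphabet_len]; omega),
      List.getD_eq_getElem _ _ (by rw [alphabet_len]; omega),
      List.getD_eq_getElem _ _ (by rw [alphabet_len]; omega)]
  simp [h1]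

theorem num_to_let_eq (x : Int) :
    num_to_let x = String.ofList [pvAlphabet.toList.getD ((x % 26).toNat) 'A'] := by
  unfold num_to_let
  rw [PySem.Int.mod_eq_emod_of_pos (by norm_num : (0:Int) < 26)]
  have h1 : (0:Int) ≤ x % 26 := Int.emod_nonneg x (by norm_num)
  have h2 : x % 26 < 26 := Int.emod_lt_of_pos x (by norm_num)
  rw [show x % 26 = ((x % 26).toNat : Int) from (Int.toNat_of_nonneg h1).symm,
      PySem.Str.pyGet?_natCast,
      List.getElem?_eq_getElem (by rw [alphabet_len]; omega)]
  rw [List.getD_eq_getElem _ _ (by rw [alphabet_len]; omega)]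
  simp [max_eq_left h1]

theorem num_to_let_congr (a b : Int) (h : a % 26 = b % 26) :
    num_to_let a = num_to_let b := by
  rw [num_to_let_eq, num_to_let_eq, h]

theorem base26_A_eq (value : Int) :
    base26ish_2_word value =
      [num_to_let (PySem.Int.floordiv value 676),
       num_to_let (PySem.Int.floordiv value 26),
       num_to_let value] := by
  unfold base26ish_2_word
  have hrange : PySem.List.pyRange 2 (-1) (-1) = [2, 1, 0] := by decide
  rw [hrange]
  simp only [List.foldl]
  norm_num [show Int.toNat 2 = 2 from rfl, List.set,
            PySem.Int.floordiv_eq_ediv_of_pos (show (0:Int) < 676 by norm_num),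
            PySem.Int.floordiv_eq_ediv_of_pos (show (0:Int) < 26 by norm_num),
            PySem.Int.floordiv_eq_ediv_of_pos (show (0:Int) < 1 by norm_num)]
  refine ⟨num_to_let_congr _ _ (by omega), num_to_let_congr _ _ (by omega)⟩

-- ===== VERDICT =====
theorem base26ish_2_word_spec : Claim_equal_base26ish_2_word := by
  intro value _
  show base26ish_2_word value = base26ish_2_word_alt value
  rw [base26_A_eq]
  unfold base26ish_2_word_alt
  rw [PySem.Int.mod_eq_emod_of_pos (by norm_num : (0:Int) < 17576)]
  have h1 : (0:Int) ≤ value % 17576 := Int.emod_nonneg value (by norm_num)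
  have h2 : value % 17576 < 17576 := Int.emod_lt_of_pos value (by norm_num)
  rw [show value % 17576 = ((value % 17576).toNat : Int) from (Int.toNat_of_nonneg h1).symm,
      PySem.List.pyGet?_natCast,
      words_getElem? _ (by omega)]
  rw [num_to_let_eq, num_to_let_eq, num_to_let_eq,
      PySem.Int.floordiv_eq_ediv_of_pos (show (0:Int) < 676 by norm_num),
      PySem.Int.floordiv_eq_ediv_of_pos (show (0:Int) < 26 by norm_num)]
  have e1 : ((value / 676) % 26).toNat = (value % 17576).toNat / 676 := by omega
  have e2 : ((value / 26) % 26).toNat = (value % 17576).toNat % 676 / 26 := by omega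
  have e3 : (value % 26).toNat = (value % 17576).toNat % 26 := by omega
  rw [e1, e2, e3]
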